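-- pv_equiv track=rewrite | github.com/paalso/hexlet-python | python-declarative-programming/stream_chunking.py | squares_plus_one
-- ===== SOURCE A (Python) =====
-- def squares_plus_one(n):
--     k = 1
--     while True:
--         next_ = k * k + 1
--         if next_ > n:
--             return
--         k += 1
--         yield next_
-- ===== SOURCE B (Python) =====
-- def _isqrt(t):
--     # Newton's method for the integer square root (t >= 0).
--     if t <= 1:
--         return t
--     x = t // 2
--     while True:
--         y = (x + t // x) // 2
--         if y < x:
--             x = y
--         else:
--             return x
--
--
-- def squares_plus_one(n):
--     # k*k + 1 <= n  <=>  k <= isqrt(n - 1), so the number of yields is known up front.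
--     if n >= 2:
--         m = _isqrt(n - 1)
--         for k in range(1, m + 1):
--             yield k * k + 1
-- ===== Notes on version B (the rewrite author's own statement) =====
-- stated objective: alternative
-- what changed: B computes the number of yielded values in closed form as the integer square root of n-1 (via a hand-written Newton iteration, since A imports nothing) and then emits the squares-plus-one over a fixed-count range, instead of A's unbounded while-loop testing the bound on every iteration.
import Mathlib
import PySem

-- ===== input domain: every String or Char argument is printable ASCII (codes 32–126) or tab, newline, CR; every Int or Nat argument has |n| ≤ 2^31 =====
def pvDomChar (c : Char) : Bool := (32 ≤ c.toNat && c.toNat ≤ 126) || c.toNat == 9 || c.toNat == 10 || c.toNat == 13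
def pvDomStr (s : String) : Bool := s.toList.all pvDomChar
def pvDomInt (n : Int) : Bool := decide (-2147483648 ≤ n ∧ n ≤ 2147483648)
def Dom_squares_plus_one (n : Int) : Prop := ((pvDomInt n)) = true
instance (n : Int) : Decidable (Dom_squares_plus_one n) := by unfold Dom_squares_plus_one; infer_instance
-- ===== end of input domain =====

-- B replaces A's open-ended while loop (test k*k+1 > n every iteration) by a
-- precomputed loop count isqrt(n-1) (Newton's method) and a fixed-count range.

-- ===== PORT A =====
-- A's while-loop: yield k*k+1 for k = 1, 2, … as long as k*k+1 ≤ n.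
def squaresLoopA (n k : Int) (hk : 1 ≤ k) : List Int :=
  if k * k + 1 > n then []
  else (k * k + 1) :: squaresLoopA n (k + 1) (by omega)
termination_by (n - k).toNat
decreasing_by
  have hkk : k * 1 ≤ k * k := by
    exact Int.mul_le_mul_of_nonneg_left hk (by omega)
  simp only [gt_iff_lt, not_lt] at *
  omega

def squares_plus_one (n : Int) : List Int :=
  squaresLoopA n 1 (le_refl 1)

-- ===== PORT B =====
-- Newton iteration from Source B's _isqrt: y = (x + t/x)/2; loop while y < x.
def bIter (t x : Nat) : Nat :=
  let y := (x + t / x) / 2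
  if y < x then bIter t y else x
termination_by x
decreasing_by assumption

def bIsqrt (t : Nat) : Nat :=
  if t ≤ 1 then t else bIter t (t / 2)

def squares_plus_one_alt (n : Int) : List Int :=
  if 2 ≤ n then
    (List.range' 1 (bIsqrt (n - 1).toNat)).map (fun (k : Nat) => (k : Int) * (k : Int) + 1)
  else []

-- ===== PRECONDITION & SPEC =====
def Spec_squares_plus_one (n : Int) (out : List Int) : Prop := out = squares_plus_one_alt n
instance (n : Int) (out : List Int) : Decidable (Spec_squares_plus_one n out) := by unfold Spec_squares_plus_one; infer_instance

-- ===== CLAIM (what is proved, stated in full; the proofs are below) =====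
def Claim_equal_squares_plus_one : Prop := ∀ (n : Int), Dom_squares_plus_one n → Spec_squares_plus_one n (squares_plus_one n)

-- ===== LEMMAS AND PROOFS =====

-- bIter has the same recursion as Batteries' Nat.sqrt.iter.
theorem bIter_eq_sqrt_iter (t : Nat) : ∀ x, bIter t x = Nat.sqrt.iter t x := by
  intro x
  induction x using Nat.strong_induction_on with
  | _ x ih =>
    rw [bIter, Nat.sqrt.iter]
    by_cases h : (x + t / x) / 2 < x
    · simp only [h, if_pos, dif_pos]
      exact ih _ h
    · simp [h]

theorem bIsqrt_eq_sqrt (t : Nat) : bIsqrt t = Nat.sqrt t := by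
  unfold bIsqrt
  by_cases ht : t ≤ 1
  · interval_cases t <;> decide
  · simp only [ht, if_false]
    rw [bIter_eq_sqrt_iter]
    refine Nat.eq_sqrt.mpr ⟨Nat.sqrt.iter_sq_le t (t / 2), ?_⟩
    apply Nat.sqrt.lt_iter_succ_sq
    have hq : 1 ≤ t / 2 := by omega
    have h2 : t ≤ 2 * (t / 2) + 1 := by omega
    nlinarith [hq, h2]

-- k*k+1 ≤ n  ↔  k ≤ sqrt ((n-1).toNat), for 1 ≤ k.
theorem cond_iff (n : Int) (k : Nat) (hk : 1 ≤ k) :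
    ((k : Int) * k + 1 ≤ n) ↔ k ≤ Nat.sqrt (n - 1).toNat := by
  by_cases hn : 2 ≤ n
  · have ht : ((n - 1).toNat : Int) = n - 1 := Int.toNat_of_nonneg (by omega)
    rw [Nat.le_sqrt]
    constructor
    · intro h
      have : (k : Int) * k ≤ ((n - 1).toNat : Int) := by omega
      exact_mod_cast this
    · intro h
      have : ((k * k : Nat) : Int) ≤ ((n - 1).toNat : Int) := by exact_mod_cast h
      push_cast at this
      omega
  · have h0 : (n - 1).toNat = 0 := by omega
    rw [h0]
    simp only [Nat.sqrt_zero]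
    constructor
    · intro h
      exfalso
      have : (1 : Int) ≤ (k : Int) := by exact_mod_cast hk
      nlinarith
    · intro h; omega

theorem squaresLoopA_eq (n : Int) : ∀ (c k : Nat) (hk : 1 ≤ k),
    c = Nat.sqrt (n - 1).toNat + 1 - k →
    squaresLoopA n (k : Int) (by exact_mod_cast hk) =
      (List.range' k c).map (fun (j : Nat) => (j : Int) * (j : Int) + 1) := by
  intro c
  induction c with
  | zero =>
    intro k hk hc
    have hgt : Nat.sqrt (n - 1).toNat < k := by omega
    rw [squaresLoopA]
    have : ¬ ((k : Int) * k + 1 ≤ n) := by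
      rw [cond_iff n k hk]; omega
    simp only [gt_iff_lt]
    rw [if_pos (by omega)]
    simp
  | succ c ih =>
    intro k hk hc
    have hle : k ≤ Nat.sqrt (n - 1).toNat := by omega
    have hcond : (k : Int) * k + 1 ≤ n := (cond_iff n k hk).mpr hle
    rw [squaresLoopA]
    rw [if_neg (by omega)]
    rw [List.range'_succ, List.map_cons]
    have := ih (k + 1) (by omega) (by omega)
    exact congrArg _ this

theorem squares_plus_one_eq_alt (n : Int) :
    squares_plus_one n = squares_plus_one_alt n := by
  unfold squares_plus_one squares_plus_one_alt
  have h := squaresLoopA_eq n (Nat.sqrt (n - 1).toNat) 1 (le_refl 1) (by omega)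
  simp only [Nat.cast_one] at h
  rw [h, bIsqrt_eq_sqrt]
  by_cases hn : 2 ≤ n
  · rw [if_pos hn]
  · rw [if_neg hn]
    have h0 : (n - 1).toNat = 0 := by omega
    rw [h0]
    simp

-- ===== VERDICT (by name: the statement is the Claim_ definition above) =====
theorem squares_plus_one_spec : Claim_equal_squares_plus_one := by
  intro n _
  unfold Spec_squares_plus_one
  exact squares_plus_one_eq_alt n
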